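/- GENERATED by farm/mkstatement.py from design/units.tsv (unit `inverse_mdct.12`) and the assertions of Vorbis/Spec/MdctTop.lean — do not edit.
   THE STATEMENT of the proof unit `inverse_mdct.12`: segment 12 of `inverse_mdct` (14 instructions; entries 0x10a164;
   exits 0x109d72,ret; ranges 0x10a164-0x10a18e)
   takes each of its entry assertions to one of its exit assertions (`Vorbis.Spec.inverse_mdct.Seg12`), given the contracts of its callees.
   What the names mean: Vorbis/Spec/Basic.lean (the shared hypotheses), Vorbis/Spec/MdctTop.lean (the assertions). The theorem to prove:
   `theorem inverse_mdct_12_ok : Vorbis.Spec.inverse_mdct_12.Statement`. -/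
import Vorbis.Spec.Alloc
import Vorbis.Spec.MdctTop
namespace Vorbis.Spec.inverse_mdct_12
open X86 X86.User Asan

/-- The statement of unit `inverse_mdct.12`. -/
def Statement : Prop :=
  ∀ (Lay : Layout) (_hLay : Lay.hi = 0x1000000) (μ : Microarch) (_hμ : UserX.MicroOK μ) (u₀ : State)
    (_hcode : HasCodeNat Lay u₀ Vorbis.L.inverse_mdct.entry Vorbis.Code.code_inverse_mdct.nat Vorbis.L.inverse_mdct.size)
    (_h_arena_temp_restore : ∀ (others : List Obj) (frames : List (Nat × FrameLayout)) (A : Arena) (dead keep : List (Nat × Nat)), Calls Lay μ Vorbis.WayInv (Vorbis.conv u₀) Vorbis.L.arena_temp_restore.entry (Vorbis.Spec.arena_temp_restore.spec others frames A dead keep)),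
    Vorbis.Spec.inverse_mdct.Seg12 Lay μ u₀

end Vorbis.Spec.inverse_mdct_12
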